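-- pv_equiv track=rewrite | github.com/saurav6719/my-codes | fair_im_pipeline.py | select_seed_via_rr
-- ===== SOURCE A (Python) =====
-- from collections import defaultdict, Counter
--
-- def select_seed_via_rr(rr_sets, k):
--     cover_count = Counter()
--     rr_index_containing = defaultdict(list)
--     for i, rr in enumerate(rr_sets):
--         for node in rr:
--             cover_count[node] += 1
--             rr_index_containing[node].append(i)
--     selected = []
--     covered = set()
--     for _ in range(k):
--         if not cover_count:
--             break
--         node, _ = cover_count.most_common(1)[0]
--         selected.append(node)
--         for idx in rr_index_containing[node]:
--             if idx in covered:
--                 continue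
--             covered.add(idx)
--             for u in rr_sets[idx]:
--                 cover_count[u] -= 1
--                 if cover_count[u] <= 0:
--                     del cover_count[u]
--         if node in cover_count:
--             del cover_count[node]
--     return selected
-- ===== SOURCE B (Python) =====
-- def select_seed_via_rr(rr_sets, k):
--     # Rank each node by first appearance across all RR sets (Counter insertion order in A).
--     rank = {}
--     for rr in rr_sets:
--         for node in rr:
--             if node not in rank:
--                 rank[node] = len(rank)
--     selected = []
--     uncovered = rr_sets
--     rounds = 0
--     while rounds < k:
--         rounds += 1
--         counts = {}
--         for rr in uncovered:
--             for node in rr: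
--                 counts[node] = counts.get(node, 0) + 1
--         best = None
--         best_c = 0
--         for node, c in counts.items():
--             if best is None or c > best_c or (c == best_c and rank[node] < rank[best]):
--                 best, best_c = node, c
--         if best is None:
--             break
--         selected.append(best)
--         uncovered = [rr for rr in uncovered if best not in rr]
--     return selected
-- ===== Notes on version B (the rewrite author's own statement) =====
-- stated objective: simpler
-- what changed: B drops A's incrementally-decremented Counter, covered-index set and node-to-RR-set inverted index, and instead recounts node frequencies over the list of still-uncovered RR sets each round, breaking ties with a precomputed first-appearance rank and filtering out newly covered sets.
import Mathlib
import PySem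

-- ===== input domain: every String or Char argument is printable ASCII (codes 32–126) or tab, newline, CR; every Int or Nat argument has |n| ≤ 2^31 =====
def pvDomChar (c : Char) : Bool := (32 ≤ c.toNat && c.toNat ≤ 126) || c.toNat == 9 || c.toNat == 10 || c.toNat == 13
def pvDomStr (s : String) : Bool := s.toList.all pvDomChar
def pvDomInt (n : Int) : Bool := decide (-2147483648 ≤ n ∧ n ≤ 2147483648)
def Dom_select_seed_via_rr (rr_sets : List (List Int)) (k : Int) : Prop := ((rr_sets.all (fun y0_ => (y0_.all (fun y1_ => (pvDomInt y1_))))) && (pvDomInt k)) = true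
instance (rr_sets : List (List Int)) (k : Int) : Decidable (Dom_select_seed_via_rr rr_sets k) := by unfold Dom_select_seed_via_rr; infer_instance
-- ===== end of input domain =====

-- B replaces A's incrementally-decremented Counter / covered-index set / node→indices inverted
-- index by a per-round recount over the list of still-uncovered RR sets (with a precomputed
-- first-appearance rank for the tie-break); objective: simpler state, no claim of speed.

-- ===== PORT A =====
-- cover_count[u] -= 1; if cover_count[u] <= 0: del cover_count[u]
def ssrDec (cc : PySem.Dict Int Int) (u : Int) : PySem.Dict Int Int :=
  let cc1 := cc.insert u (cc.getD u 0 - 1)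
  if cc1.getD u 0 ≤ 0 then cc1.erase u else cc1

-- first loop: for i, rr in enumerate(rr_sets): for node in rr: cover_count[node] += 1; rr_index_containing[node].append(i)
def ssrInitA (rr_sets : List (List Int)) : PySem.Dict Int Int × PySem.Dict Int (List Int) :=
  (PySem.List.enumerate rr_sets).foldl
    (fun st p =>
      p.2.foldl (fun st node =>
        (st.1.modify node 0 (· + 1), st.2.modify node [] (· ++ [p.1]))) st)
    (PySem.Dict.empty, PySem.Dict.empty)

-- body of: for idx in rr_index_containing[node]: …  (rr_sets[idx] via pyGetD: idx is a valid index by construction)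
def ssrCoverA (rr_sets : List (List Int)) (st : PySem.Set Int × PySem.Dict Int Int) (idx : Int) :
    PySem.Set Int × PySem.Dict Int Int :=
  if PySem.Set.contains st.1 idx then st
  else (PySem.Set.add st.1 idx, (PySem.List.pyGetD rr_sets idx []).foldl ssrDec st.2)

-- for _ in range(k): … with break, fuel = number of remaining iterations
def ssrLoopA (rr_sets : List (List Int)) (idxd : PySem.Dict Int (List Int)) :
    Nat → PySem.Dict Int Int → PySem.Set Int → List Int → List Int
  | 0, _, _, selected => selected
  | n + 1, cc, covered, selected =>
    if cc.items.isEmpty then selected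
    else
      match PySem.List.max? cc.items (fun p => p.2) with
      | none => selected   -- unreachable: cc nonempty
      | some p =>
        let node := p.1
        let st := (idxd.getD node []).foldl (ssrCoverA rr_sets) (covered, cc)
        let cc2 := if st.2.contains node then st.2.erase node else st.2
        ssrLoopA rr_sets idxd n cc2 st.1 (selected ++ [node])

def select_seed_via_rr (rr_sets : List (List Int)) (k : Int) : List Int :=
  let init := ssrInitA rr_sets
  ssrLoopA rr_sets init.2 k.toNat init.1 PySem.Set.empty []

-- ===== PORT B =====
-- rank: first-appearance order of each node (rank[node] = len(rank))
def ssrRank (rr_sets : List (List Int)) : PySem.Dict Int Int :=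
  rr_sets.foldl
    (fun r rr => rr.foldl (fun r node => if r.contains node then r else r.insert node (r.size : Int)) r) PySem.Dict.empty

-- counts = {}; for rr in uncovered: for node in rr: counts[node] = counts.get(node, 0) + 1
def ssrCounts (uncovered : List (List Int)) : PySem.Dict Int Int :=
  uncovered.foldl (fun c rr => rr.foldl (fun c node => c.insert node (c.getD node 0 + 1)) c) PySem.Dict.empty

-- best-selection scan; state = (best, best_c) with best=None encoded as none (rank[·] via getD: keys always present)
def ssrBest (rank : PySem.Dict Int Int) (counts : PySem.Dict Int Int) : Option (Int × Int) :=
  counts.items.foldl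
    (fun b p =>
      match b with
      | none => some p
      | some q => if q.2 < p.2 ∨ (p.2 = q.2 ∧ rank.getD p.1 0 < rank.getD q.1 0) then some p else some q)
    none

-- while rounds < k: … ; fuel = number of remaining rounds
def ssrLoopB (rank : PySem.Dict Int Int) : Nat → List (List Int) → List Int → List Int
  | 0, _, selected => selected
  | n + 1, uncovered, selected =>
    match ssrBest rank (ssrCounts uncovered) with
    | none => selected
    | some p => ssrLoopB rank n (uncovered.filter (fun rr => !rr.contains p.1)) (selected ++ [p.1])

def select_seed_via_rr_alt (rr_sets : List (List Int)) (k : Int) : List Int :=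
  ssrLoopB (ssrRank rr_sets) k.toNat rr_sets []

-- ===== PRECONDITION & SPEC =====
def Spec_select_seed_via_rr (rr_sets : List (List Int)) (k : Int) (out : List Int) : Prop := out = select_seed_via_rr_alt rr_sets k
instance (rr_sets : List (List Int)) (k : Int) (out : List Int) : Decidable (Spec_select_seed_via_rr rr_sets k out) := by unfold Spec_select_seed_via_rr; infer_instance

-- ===== CLAIM (what is proved, stated in full; the proofs are below) =====
def Claim_equal_select_seed_via_rr : Prop := ∀ (rr_sets : List (List Int)) (k : Int), Dom_select_seed_via_rr rr_sets k → Spec_select_seed_via_rr rr_sets k (select_seed_via_rr rr_sets k)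

-- ===== LEMMAS AND PROOFS =====

-- first-appearance order of all nodes
def ssrOrder (rr_sets : List (List Int)) : List Int := PySem.Set.ofList rr_sets.flatten

-- the RR sets whose index is not yet covered
def ssrUnc (rr_sets : List (List Int)) (cov : PySem.Set Int) : List (List Int) :=
  ((List.range rr_sets.length).filter (fun i : Nat => !cov.contains (i : Int))).map (fun i => rr_sets.getD i [])

-- number of occurrences of u among uncovered RR sets (= A's live counter value)
def ssrCnt (rr_sets : List (List Int)) (cov : PySem.Set Int) (u : Int) : Int :=
  ((ssrUnc rr_sets cov).flatten.count u : Int)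

-- canonical form of A's counter: keys in first-appearance order, positive counts only
def ssrCanon (order : List Int) (g : Int → Int) : PySem.Dict Int Int :=
  ⟨(order.filter (fun u => decide (0 < g u))).map (fun u => (u, g u))⟩

-- rank dict after processing first-appearance list L
def ssrRankOf (L : List Int) : PySem.Dict Int Int :=
  ⟨L.zipIdx.map (fun p => (p.1, (p.2 : Int)))⟩


theorem ssrCanon_items (order : List Int) (g : Int → Int) :
    (ssrCanon order g).items = (order.filter (fun u => decide (0 < g u))).map (fun u => (u, g u)) := rfl

theorem ssrCanon_keys (order : List Int) (g : Int → Int) :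
    (ssrCanon order g).keys = order.filter (fun u => decide (0 < g u)) := by
  simp [PySem.Dict.keys, ssrCanon_items, List.map_map, Function.comp_def]

theorem ssrCanon_keys_nodup (order : List Int) (g : Int → Int) (hnd : order.Nodup) :
    (ssrCanon order g).keys.Nodup := by
  rw [ssrCanon_keys]; exact hnd.filter _

theorem ssrCanon_mem_items (order : List Int) (g : Int → Int) (u c : Int) :
    (u, c) ∈ (ssrCanon order g).items ↔ u ∈ order ∧ 0 < g u ∧ c = g u := by
  simp [ssrCanon_items, List.mem_filter]
  aesop

theorem ssrCanon_getD (order : List Int) (g : Int → Int) (u : Int) (hnd : order.Nodup)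
    (hu : u ∈ order) (hg : 0 < g u) : (ssrCanon order g).getD u 0 = g u := by
  exact PySem.Dict.getD_of_mem_items _ ((ssrCanon_mem_items order g u (g u)).2 ⟨hu, hg, rfl⟩)
    (ssrCanon_keys_nodup order g hnd) 0

theorem ssrCanon_contains (order : List Int) (g : Int → Int) (u : Int) :
    (ssrCanon order g).contains u = decide (u ∈ order ∧ 0 < g u) := by
  have : (ssrCanon order g).contains u = decide (u ∈ (ssrCanon order g).keys) :=
    PySem.Dict.contains_eq_decide_mem_keys _ _
  rw [this, ssrCanon_keys]
  simp [List.mem_filter]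

theorem ssrDec_canon (order : List Int) (g : Int → Int) (u : Int) (hnd : order.Nodup)
    (hu : u ∈ order) (h1 : 1 ≤ g u) :
    ssrDec (ssrCanon order g) u = ssrCanon order (fun v => if v = u then g u - 1 else g v) := by
  have hgd : (ssrCanon order g).getD u 0 = g u := ssrCanon_getD order g u hnd hu (by omega)
  have hct : (ssrCanon order g).contains u = true := by
    rw [ssrCanon_contains]; simp [hu]; omega
  set g' : Int → Int := fun v => if v = u then g u - 1 else g v with hg'
  have hitems1 : ((ssrCanon order g).insert u (g u - 1)).items
      = (order.filter (fun v => decide (0 < g v))).map (fun v => (v, if v = u then g u - 1 else g v)) := by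
    rw [PySem.Dict.items_insert_of_contains _ _ hct, ssrCanon_items, List.map_map]
    refine List.map_congr_left ?_
    intro v hv
    by_cases hvu : v = u
    · subst hvu; simp
    · simp [Function.comp, hvu, beq_iff_eq]
  have hgd1 : ((ssrCanon order g).insert u (g u - 1)).getD u 0 = g u - 1 := by
    simp [PySem.Dict.getD_insert_self]
  unfold ssrDec
  rw [hgd]
  show (if ((ssrCanon order g).insert u (g u - 1)).getD u 0 ≤ 0
      then ((ssrCanon order g).insert u (g u - 1)).erase u
      else (ssrCanon order g).insert u (g u - 1)) = ssrCanon order g'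
  rw [hgd1]
  by_cases hle : g u - 1 ≤ 0
  · have hgu1 : g u = 1 := by omega
    simp only [hle, if_pos]
    apply PySem.Dict.ext
    show (((ssrCanon order g).insert u (g u - 1)).items.filter (fun p => !p.1 == u))
        = (ssrCanon order g').items
    rw [hitems1, List.filter_map, ssrCanon_items]
    rw [List.filter_filter]
    have hfe : (order.filter (fun v =>
        ((fun p : Int × Int => !p.1 == u) ∘ (fun v => (v, if v = u then g u - 1 else g v))) v
          && decide (0 < g v)))
        = order.filter (fun v => decide (0 < g' v)) := by
      apply List.filter_congr
      intro v _
      by_cases hvu : v = u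
      · subst hvu; simp [hg', Function.comp, hgu1]
      · simp [hg', Function.comp, hvu]
    rw [hfe]
  · simp only [hle, if_false]
    apply PySem.Dict.ext
    rw [hitems1, ssrCanon_items]
    have hfe : order.filter (fun v => decide (0 < g v)) = order.filter (fun v => decide (0 < g' v)) := by
      apply List.filter_congr
      intro v _
      by_cases hvu : v = u
      · subst hvu; simp [hg']; omega
      · simp [hg', hvu]
    rw [hfe]

theorem ssrDec_list (order : List Int) (hnd : order.Nodup) :
    ∀ (L : List Int) (g : Int → Int), (∀ v ∈ L, v ∈ order) → (∀ v, (L.count v : Int) ≤ g v) →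
    L.foldl ssrDec (ssrCanon order g) = ssrCanon order (fun v => g v - L.count v) := by
  intro L
  induction L with
  | nil =>
    intro g _ _
    simp only [List.foldl_nil, List.count_nil]
    exact congrArg (ssrCanon order) (by funext v; simp)
  | cons u t ih =>
    intro g hmem hcnt
    have hu : u ∈ order := hmem u (by simp)
    have h1 : 1 ≤ g u := by
      have := hcnt u
      simp [List.count_cons_self] at this
      have h0 : (0 : Int) ≤ (t.count u : Int) := by positivity
      omega
    rw [List.foldl_cons, ssrDec_canon order g u hnd hu h1]
    rw [ih (fun v => if v = u then g u - 1 else g v) (fun v hv => hmem v (by simp [hv]))]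
    · exact congrArg (ssrCanon order) (by
        funext v
        by_cases hvu : v = u
        · subst hvu; simp [List.count_cons_self]; ring
        · simp [hvu, Ne.symm hvu])
    · intro v
      by_cases hvu : v = u
      · subst hvu
        have := hcnt v
        simp [List.count_cons_self] at this ⊢
        omega
      · have := hcnt v
        simp [hvu, Ne.symm hvu] at this ⊢
        omega

theorem ssrSetContains (s : PySem.Set Int) (x : Int) : s.contains x = true ↔ x ∈ s := by
  simp [PySem.Set.contains]

theorem ssrSetContainsF (s : PySem.Set Int) (x : Int) : s.contains x = false ↔ x ∉ s := by
  rw [← ssrSetContains]; simp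

theorem ssrUnc_empty (rr_sets : List (List Int)) : ssrUnc rr_sets PySem.Set.empty = rr_sets := by
  unfold ssrUnc
  have h1 : (List.range rr_sets.length).filter (fun i : Nat => !PySem.Set.contains PySem.Set.empty (i : Int))
      = List.range rr_sets.length := by
    apply List.filter_eq_self.2
    intro a _
    rfl
  rw [h1]
  apply List.ext_getElem (by simp)
  intro i h1' h2
  simp [List.getElem?_eq_getElem h2]

theorem ssrUnc_mem (rr_sets : List (List Int)) (cov : PySem.Set Int) (l : List Int)
    (h : l ∈ ssrUnc rr_sets cov) : l ∈ rr_sets := by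
  unfold ssrUnc at h
  obtain ⟨i, hi, rfl⟩ := List.mem_map.1 h
  have : i < rr_sets.length := by simpa using (List.mem_range.1 (List.mem_of_mem_filter hi))
  rw [List.getD_eq_getElem _ _ this]
  exact List.getElem_mem _

theorem ssrUnc_flatten_mem_order (rr_sets : List (List Int)) (cov : PySem.Set Int) (u : Int)
    (h : u ∈ (ssrUnc rr_sets cov).flatten) : u ∈ ssrOrder rr_sets := by
  obtain ⟨l, hl, hu⟩ := List.mem_flatten.1 h
  unfold ssrOrder
  rw [PySem.Set.mem_ofList]
  exact List.mem_flatten.2 ⟨l, ssrUnc_mem rr_sets cov l hl, hu⟩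

theorem ssrCnt_pos_iff (rr_sets : List (List Int)) (cov : PySem.Set Int) (u : Int) :
    0 < ssrCnt rr_sets cov u ↔ u ∈ (ssrUnc rr_sets cov).flatten := by
  unfold ssrCnt
  rw [← List.count_pos_iff]
  exact_mod_cast Iff.rfl

theorem ssrCnt_le (rr_sets : List (List Int)) (cov : PySem.Set Int) (i : Nat)
    (hlen : i < rr_sets.length) (hnc : cov.contains (i : Int) = false) (u : Int) :
    ((rr_sets.getD i []).count u : Int) ≤ ssrCnt rr_sets cov u := by
  have hmem : rr_sets.getD i [] ∈ ssrUnc rr_sets cov := by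
    unfold ssrUnc
    exact List.mem_map.2 ⟨i, List.mem_filter.2 ⟨List.mem_range.2 hlen, by simp [(ssrSetContainsF cov _).1 hnc]⟩, rfl⟩
  unfold ssrCnt
  have : (rr_sets.getD i []).count u ≤ (ssrUnc rr_sets cov).flatten.count u := by
    rw [List.count_flatten]
    exact List.le_sum_of_mem (List.mem_map.2 ⟨_, hmem, rfl⟩)
  exact_mod_cast this

theorem ssrCnt_add (rr_sets : List (List Int)) (cov : PySem.Set Int) (i : Nat)
    (hlen : i < rr_sets.length) (hnc : cov.contains (i : Int) = false) (u : Int) :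
    ssrCnt rr_sets cov u = ssrCnt rr_sets (PySem.Set.add cov (i : Int)) u + ((rr_sets.getD i []).count u : Int) := by
  unfold ssrCnt ssrUnc
  have hni : (i : Int) ∉ cov := (ssrSetContainsF cov _).1 hnc
  have hr2 : (List.range rr_sets.length).filter (fun j : Nat => !(PySem.Set.add cov (i : Int)).contains (j : Int))
      = ((List.range rr_sets.length).filter (fun j : Nat => !cov.contains (j : Int))).filter (fun j => j ≠ i) := by
    rw [List.filter_filter]
    apply List.filter_congr
    intro j _
    have hiff : ((PySem.Set.add cov (i : Int)).contains (j : Int) = true) ↔ (cov.contains (j : Int) = true ∨ j = i) := by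
      rw [ssrSetContains, PySem.Set.mem_add, ssrSetContains]
      constructor
      · rintro (h | h)
        · exact Or.inl h
        · exact Or.inr (by exact_mod_cast h)
      · rintro (h | h)
        · exact Or.inl h
        · exact Or.inr (by exact_mod_cast h)
    cases hcj : cov.contains (j : Int) <;> by_cases hji : j = i <;>
      simp_all
  have hi_mem : i ∈ (List.range rr_sets.length).filter (fun j : Nat => !cov.contains (j : Int)) := by
    exact List.mem_filter.2 ⟨List.mem_range.2 hlen, by simp [(ssrSetContainsF cov _).1 hnc]⟩
  have hnd1 : ((List.range rr_sets.length).filter (fun j : Nat => !cov.contains (j : Int))).Nodup :=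
    (List.nodup_range).filter _
  have herase : ((List.range rr_sets.length).filter (fun j : Nat => !cov.contains (j : Int))).erase i
      = ((List.range rr_sets.length).filter (fun j : Nat => !cov.contains (j : Int))).filter (fun j => j ≠ i) := by
    rw [List.Nodup.erase_eq_filter hnd1]
    apply List.filter_congr
    intro j _
    simp [bne, Bool.beq_eq_decide_eq]
  have hperm := List.perm_cons_erase hi_mem
  rw [hr2, ← herase]
  have : ∀ (r : List Nat), ((r.map (fun j => rr_sets.getD j [])).flatten.count u)
      = (r.map (fun j => (rr_sets.getD j []).count u)).sum := by
    intro r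
    rw [List.count_flatten, List.map_map]
    rfl
  rw [this, this]
  rw [List.Perm.sum_eq (hperm.map _)]
  push_cast
  simp
  ring

theorem ssrMem_order (rr_sets : List (List Int)) (l : List Int) (hl : l ∈ rr_sets)
    (v : Int) (hv : v ∈ l) : v ∈ ssrOrder rr_sets := by
  unfold ssrOrder
  rw [PySem.Set.mem_ofList]
  exact List.mem_flatten.2 ⟨l, hl, hv⟩

theorem ssrCover_fold (rr_sets : List (List Int)) (hnd : (ssrOrder rr_sets).Nodup) :
    ∀ (L : List Int) (cov : PySem.Set Int),
    (∀ idx ∈ L, 0 ≤ idx ∧ idx.toNat < rr_sets.length) →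
    L.foldl (ssrCoverA rr_sets) (cov, ssrCanon (ssrOrder rr_sets) (ssrCnt rr_sets cov))
      = (L.foldl PySem.Set.add cov,
         ssrCanon (ssrOrder rr_sets) (ssrCnt rr_sets (L.foldl PySem.Set.add cov))) := by
  intro L
  induction L with
  | nil => intro cov _; simp
  | cons idx t ih =>
    intro cov hval
    obtain ⟨hge, hlt⟩ := hval idx (by simp)
    rw [List.foldl_cons, List.foldl_cons]
    by_cases hc : PySem.Set.contains cov idx = true
    · have hadd : PySem.Set.add cov idx = cov := by unfold PySem.Set.add; rw [if_pos hc]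
      have hcov : ssrCoverA rr_sets (cov, ssrCanon (ssrOrder rr_sets) (ssrCnt rr_sets cov)) idx
          = (cov, ssrCanon (ssrOrder rr_sets) (ssrCnt rr_sets cov)) := by
        unfold ssrCoverA; rw [if_pos hc]
      rw [hcov, hadd]
      exact ih cov (fun j hj => hval j (by simp [hj]))
    · have hcf : PySem.Set.contains cov idx = false := by simpa using hc
      have hidx : idx = ((idx.toNat : Nat) : Int) := by omega
      have hlget : PySem.List.pyGetD rr_sets idx [] = rr_sets.getD idx.toNat [] := by
        exact PySem.List.pyGetD_of_nonneg rr_sets [] hge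
      have hlmem : rr_sets.getD idx.toNat [] ∈ rr_sets := by
        rw [List.getD_eq_getElem _ _ hlt]; exact List.getElem_mem _
      have hcov : ssrCoverA rr_sets (cov, ssrCanon (ssrOrder rr_sets) (ssrCnt rr_sets cov)) idx
          = (PySem.Set.add cov idx,
             ssrCanon (ssrOrder rr_sets) (ssrCnt rr_sets (PySem.Set.add cov idx))) := by
        unfold ssrCoverA
        rw [if_neg hc]
        congr 1
        rw [hlget]
        rw [ssrDec_list (ssrOrder rr_sets) hnd _ _
          (fun v hv => ssrMem_order rr_sets _ hlmem v hv)
          (fun v => by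
            rw [hidx]
            exact ssrCnt_le rr_sets cov idx.toNat hlt (hidx ▸ hcf) v)]
        refine congrArg (ssrCanon (ssrOrder rr_sets)) ?_
        funext v
        have h2 := ssrCnt_add rr_sets cov idx.toNat hlt (hidx ▸ hcf) v
        rw [← hidx] at h2
        omega
      rw [hcov]
      exact ih (PySem.Set.add cov idx) (fun j hj => hval j (by simp [hj]))

theorem ssrInitA_eq (rr_sets : List (List Int)) : ssrInitA rr_sets =
    ((PySem.List.enumerate rr_sets).foldl
       (fun cc p => p.2.foldl (fun cc node => cc.modify node 0 (· + 1)) cc) PySem.Dict.empty,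
     (PySem.List.enumerate rr_sets).foldl
       (fun d p => p.2.foldl (fun d node => d.modify node [] (· ++ [p.1])) d) PySem.Dict.empty) := by
  unfold ssrInitA
  generalize PySem.List.enumerate rr_sets = L
  suffices h : ∀ (L : List (Int × List Int)) (a : PySem.Dict Int Int) (b : PySem.Dict Int (List Int)),
      L.foldl (fun st p => p.2.foldl (fun st node =>
        (st.1.modify node 0 (· + 1), st.2.modify node [] (· ++ [p.1]))) st) (a, b)
      = (L.foldl (fun cc p => p.2.foldl (fun cc node => cc.modify node 0 (· + 1)) cc) a,
         L.foldl (fun d p => p.2.foldl (fun d node => d.modify node [] (· ++ [p.1])) d) b) by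
    exact h L _ _
  intro L
  induction L with
  | nil => intro a b; rfl
  | cons p t ih =>
    intro a b
    rw [List.foldl_cons, List.foldl_cons, List.foldl_cons]
    rw [PySem.List.foldl_prod_mk (fun cc node => cc.modify node 0 (· + 1))
      (fun d node => d.modify node [] (· ++ [p.1])) p.2 a b]
    exact ih _ _

theorem ssrInitA_cc (rr_sets : List (List Int)) :
    (ssrInitA rr_sets).1 = PySem.Dict.counter rr_sets.flatten := by
  rw [ssrInitA_eq]
  simp only []
  have hmap := List.foldl_map (f := fun p : Int × List Int => p.2)
    (g := fun (cc : PySem.Dict Int Int) (rr : List Int) =>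
      rr.foldl (fun cc node => cc.modify node 0 (· + 1)) cc)
    (l := PySem.List.enumerate rr_sets 0) (init := PySem.Dict.empty)
  rw [PySem.List.map_snd_enumerate] at hmap
  rw [PySem.Dict.counter_eq_foldl, List.foldl_flatten, ← hmap]

theorem ssrInitA_idxd (rr_sets : List (List Int)) (node : Int) :
    (ssrInitA rr_sets).2.getD node []
      = (((PySem.List.enumerate rr_sets).flatMap (fun p => p.2.map (fun v => (v, p.1)))).filter
          (fun q => q.1 == node)).map (fun q => q.2) := by
  rw [ssrInitA_eq]
  simp only []
  have h1 : (PySem.List.enumerate rr_sets).foldl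
      (fun d p => p.2.foldl (fun d node => d.modify node [] (· ++ [p.1])) d) PySem.Dict.empty
      = ((PySem.List.enumerate rr_sets).flatMap (fun p => p.2.map (fun v => (v, p.1)))).foldl
          (fun d q => d.modify q.1 [] (· ++ [q.2])) PySem.Dict.empty := by
    rw [List.flatMap_def, List.foldl_flatten, List.foldl_map]
    have hfun : (fun (d : PySem.Dict Int (List Int)) (p : Int × List Int) =>
        p.2.foldl (fun d node => d.modify node [] (· ++ [p.1])) d)
        = (fun d p => (p.2.map (fun v => (v, p.1))).foldl
            (fun d q => d.modify q.1 [] (· ++ [q.2])) d) := by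
      funext d p
      rw [List.foldl_map]
    rw [hfun]
  rw [h1, PySem.Dict.getD_foldl_modify_append]
  simp

theorem ssrIdxd_valid (rr_sets : List (List Int)) (node : Int) (idx : Int)
    (h : idx ∈ (ssrInitA rr_sets).2.getD node []) :
    0 ≤ idx ∧ idx.toNat < rr_sets.length ∧ node ∈ rr_sets.getD idx.toNat [] := by
  rw [ssrInitA_idxd] at h
  obtain ⟨q, hq, rfl⟩ := List.mem_map.1 h
  have hq1 := List.mem_filter.1 hq
  obtain ⟨p, hp, hqp⟩ := List.mem_flatMap.1 hq1.1
  obtain ⟨k, hk, rfl⟩ := (PySem.List.mem_enumerate_iff _ _ _).1 hp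
  obtain ⟨v, hv, rfl⟩ := List.mem_map.1 hqp
  have hnode : v = node := by simpa using hq1.2
  subst hnode
  refine ⟨by positivity, by simpa using hk, ?_⟩
  rw [show ((0 + (k : Int)).toNat) = k by omega, List.getD_eq_getElem _ _ hk]
  exact hv

theorem ssrIdxd_complete (rr_sets : List (List Int)) (node : Int) (i : Nat)
    (hlen : i < rr_sets.length) (hmem : node ∈ rr_sets.getD i []) :
    (i : Int) ∈ (ssrInitA rr_sets).2.getD node [] := by
  rw [ssrInitA_idxd]
  refine List.mem_map.2 ⟨(node, (i : Int)), List.mem_filter.2 ⟨?_, by simp⟩, rfl⟩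
  refine List.mem_flatMap.2 ⟨((i : Int), rr_sets[i]), ?_, ?_⟩
  · exact (PySem.List.mem_enumerate_iff _ _ _).2 ⟨i, hlen, by simp⟩
  · exact List.mem_map.2 ⟨node, by rwa [List.getD_eq_getElem _ _ hlen] at hmem, rfl⟩

theorem ssrRankOf_keys (L : List Int) : (ssrRankOf L).keys = L := by
  show (L.zipIdx.map (fun p => (p.1, (p.2 : Int)))).map Prod.fst = L
  rw [List.map_map]
  have : (Prod.fst ∘ fun p : Int × Nat => (p.1, (p.2 : Int))) = Prod.fst := by
    funext p; rfl
  rw [this, List.zipIdx_map_fst]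

theorem ssrRankOf_contains (L : List Int) (x : Int) :
    (ssrRankOf L).contains x = decide (x ∈ L) := by
  rw [PySem.Dict.contains_eq_decide_mem_keys, ssrRankOf_keys]

theorem ssrRankOf_size (L : List Int) : (ssrRankOf L).size = L.length := by
  show (L.zipIdx.map _).length = L.length
  simp

theorem ssrRankOf_step (L : List Int) (x : Int) (hx : x ∉ L) :
    (ssrRankOf L).insert x ((ssrRankOf L).size : Int) = ssrRankOf (L ++ [x]) := by
  have hc : (ssrRankOf L).contains x = false := by
    rw [ssrRankOf_contains]; simp [hx]
  apply PySem.Dict.ext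
  rw [PySem.Dict.items_insert_of_not_contains _ _ hc]
  show (L.zipIdx.map (fun p => (p.1, (p.2 : Int)))) ++ [(x, ((ssrRankOf L).size : Int))]
      = ((L ++ [x]).zipIdx.map (fun p => (p.1, (p.2 : Int))))
  rw [List.zipIdx_append, List.map_append, ssrRankOf_size]
  simp

theorem ssrRank_eq (rr_sets : List (List Int)) : ssrRank rr_sets = ssrRankOf (ssrOrder rr_sets) := by
  unfold ssrRank ssrOrder
  rw [PySem.Set.ofList_eq_foldl]
  have hflat : ∀ (M : List (List Int)) (r : PySem.Dict Int Int),
      M.foldl (fun r rr => rr.foldl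
        (fun r node => if r.contains node then r else r.insert node (r.size : Int)) r) r
      = M.flatten.foldl (fun r node => if r.contains node then r else r.insert node (r.size : Int)) r := by
    intro M r
    rw [List.foldl_flatten]
  rw [hflat]
  have main : ∀ (xs L : List Int), L.Nodup →
      xs.foldl (fun r node => if r.contains node then r else r.insert node (r.size : Int)) (ssrRankOf L)
      = ssrRankOf (xs.foldl PySem.Set.add L) := by
    intro xs
    induction xs with
    | nil => intro L _; rfl
    | cons x t ih =>
      intro L hnd
      rw [List.foldl_cons, List.foldl_cons]
      by_cases hx : x ∈ L
      · have hc : (ssrRankOf L).contains x = true := by rw [ssrRankOf_contains]; simp [hx]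
        have ha : PySem.Set.add L x = L := by
          unfold PySem.Set.add
          rw [if_pos (by simpa [PySem.Set.contains] using hx)]
        simp only [hc, reduceIte]
        rw [ha]
        exact ih L hnd
      · have hc : (ssrRankOf L).contains x = false := by rw [ssrRankOf_contains]; simp [hx]
        have ha : PySem.Set.add L x = L ++ [x] := by
          unfold PySem.Set.add
          rw [if_neg (by simpa [PySem.Set.contains] using hx)]
        simp only [hc, Bool.false_eq_true, reduceIte]
        rw [ssrRankOf_step L x hx, ha]
        exact ih (L ++ [x]) (by simpa using List.Nodup.concat hx hnd)
  have h0 : (PySem.Dict.empty : PySem.Dict Int Int) = ssrRankOf [] := rfl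
  rw [h0, main rr_sets.flatten [] List.nodup_nil]

theorem ssrRankOf_getD (order : List Int) (hnd : order.Nodup) (v : Int) (hv : v ∈ order) :
    (ssrRankOf order).getD v 0 = (order.idxOf v : Int) := by
  have hlt : order.idxOf v < order.length := List.idxOf_lt_length_of_mem hv
  have hmem : (v, (order.idxOf v : Int)) ∈ (ssrRankOf order).items := by
    show _ ∈ (order.zipIdx.map (fun p => (p.1, (p.2 : Int))))
    refine List.mem_map.2 ⟨(v, order.idxOf v), ?_, rfl⟩
    have h1 : (order.zipIdx)[order.idxOf v]'(by simpa using hlt) ∈ order.zipIdx :=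
      List.getElem_mem _
    have h2 := List.getElem_zipIdx (l := order) (j := 0) (i := order.idxOf v) (by simpa using hlt)
    rw [List.getElem_idxOf hlt] at h2
    rw [h2] at h1
    simpa using h1
  exact PySem.Dict.getD_of_mem_items _ hmem (by rw [ssrRankOf_keys]; exact hnd) 0

def ssrPickA : Option (Int × Int) → (Int × Int) → Option (Int × Int)
  | none, x => some x
  | some m, x => if m.2 < x.2 then some x else some m

def ssrPickB (rank : PySem.Dict Int Int) : Option (Int × Int) → (Int × Int) → Option (Int × Int)
  | none, p => some p
  | some q, p => if q.2 < p.2 ∨ (p.2 = q.2 ∧ rank.getD p.1 0 < rank.getD q.1 0) then some p else some q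

theorem ssrPickA_eq (xs : List (Int × Int)) :
    PySem.List.max? xs (fun p => p.2) = xs.foldl ssrPickA none := by
  unfold PySem.List.max?
  congr 1
  funext acc x
  cases acc <;> rfl

theorem ssrPickB_eq (rank counts : PySem.Dict Int Int) :
    ssrBest rank counts = counts.items.foldl (ssrPickB rank) none := by
  unfold ssrBest
  congr 1
  funext b p
  cases b <;> rfl

def ssrGood (order : List Int) (g : Int → Int) (S : List Int) (w : Int) : Prop :=
  w ∈ S ∧ ∀ v ∈ S, g v < g w ∨ (g v = g w ∧ order.idxOf w ≤ order.idxOf v)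

theorem ssrPairwise_idxOf (l : List Int) (h : l.Nodup) :
    l.Pairwise (fun a b => l.idxOf a < l.idxOf b) := by
  rw [List.pairwise_iff_getElem]
  intro i j hi hj hij
  rw [h.idxOf_getElem, h.idxOf_getElem]
  exact hij

theorem ssrGood_unique (order : List Int) (g : Int → Int) (S1 S2 : List Int) (w1 w2 : Int)
    (_hnd : order.Nodup) (hs : ∀ v, v ∈ S1 ↔ v ∈ S2)
    (h1 : ssrGood order g S1 w1) (h2 : ssrGood order g S2 w2)
    (ho1 : w1 ∈ order) (_ho2 : w2 ∈ order) : w1 = w2 := by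
  obtain ⟨hm1, hb1⟩ := h1
  obtain ⟨hm2, hb2⟩ := h2
  have c1 := hb1 w2 ((hs w2).2 hm2)
  have c2 := hb2 w1 ((hs w1).1 hm1)
  have hpos : order.idxOf w1 = order.idxOf w2 := by omega
  exact (List.idxOf_inj ho1).1 hpos

theorem ssrMaxA_helper (order : List Int) (g : Int → Int) :
    ∀ (L : List Int) (w0 : Int),
    (w0 :: L).Pairwise (fun a b => order.idxOf a < order.idxOf b) →
    ∃ w, (L.map (fun v => (v, g v))).foldl ssrPickA (some (w0, g w0)) = some (w, g w)
      ∧ ssrGood order g (w0 :: L) w := by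
  intro L
  induction L with
  | nil =>
    intro w0 _
    exact ⟨w0, rfl, by simp, by
      intro v hv
      simp at hv
      subst hv
      omega⟩
  | cons x t ih =>
    intro w0 hpw
    have hpw_tail : (x :: t).Pairwise (fun a b => order.idxOf a < order.idxOf b) := hpw.of_cons
    have hw0x : order.idxOf w0 < order.idxOf x := (List.pairwise_cons.1 hpw).1 x (by simp)
    have hw0t : ∀ v ∈ t, order.idxOf w0 < order.idxOf v := fun v hv =>
      (List.pairwise_cons.1 hpw).1 v (by simp [hv])
    have hpw_skip : (w0 :: t).Pairwise (fun a b => order.idxOf a < order.idxOf b) := by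
      rw [List.pairwise_cons]
      exact ⟨hw0t, hpw_tail.of_cons⟩
    rw [List.map_cons, List.foldl_cons]
    by_cases hlt : g w0 < g x
    · rw [show ssrPickA (some (w0, g w0)) (x, g x) = some (x, g x) from by
        unfold ssrPickA; simp [hlt]]
      obtain ⟨w, hw, hgood⟩ := ih x hpw_tail
      refine ⟨w, hw, List.mem_cons_of_mem _ hgood.1, ?_⟩
      intro v hv
      rcases List.mem_cons.1 hv with rfl | hv'
      · rcases hgood.2 x (by simp) with h | h
        · left; omega
        · left; omega
      · exact hgood.2 v hv'
    · rw [show ssrPickA (some (w0, g w0)) (x, g x) = some (w0, g w0) from by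
        unfold ssrPickA; simp [hlt]]
      obtain ⟨w, hw, hgood⟩ := ih w0 hpw_skip
      refine ⟨w, hw, ?_, ?_⟩
      · rcases List.mem_cons.1 hgood.1 with rfl | hv'
        · simp
        · simp [hv']
      · intro v hv
        rcases List.mem_cons.1 hv with rfl | hv'
        · exact hgood.2 v (by simp)
        rcases List.mem_cons.1 hv' with rfl | hv''
        · -- v = x
          rcases hgood.2 w0 (by simp) with h | h
          · left; omega
          · -- g w0 = g w, idxOf w ≤ idxOf w0
            by_cases hgx : g v < g w
            · left; exact hgx
            · right
              constructor
              · omega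
              · omega
        · exact hgood.2 v (by simp [hv''])

theorem ssrBestB_helper (order : List Int) (g : Int → Int) (rank : PySem.Dict Int Int)
    (hrank : ∀ v ∈ order, rank.getD v 0 = (order.idxOf v : Int)) :
    ∀ (S : List Int) (w0 : Int), w0 ∈ order → (∀ v ∈ S, v ∈ order) →
    ∃ w, (S.map (fun v => (v, g v))).foldl (ssrPickB rank) (some (w0, g w0)) = some (w, g w)
      ∧ ssrGood order g (w0 :: S) w ∧ w ∈ order := by
  intro S
  induction S with
  | nil =>
    intro w0 hw0 _
    exact ⟨w0, rfl, ⟨by simp, by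
      intro v hv
      simp at hv
      subst hv
      omega⟩, hw0⟩
  | cons x t ih =>
    intro w0 hw0 hmem
    have hx : x ∈ order := hmem x (by simp)
    rw [List.map_cons, List.foldl_cons]
    by_cases hsw : g w0 < g x ∨ (g x = g w0 ∧ rank.getD x 0 < rank.getD w0 0)
    · rw [show ssrPickB rank (some (w0, g w0)) (x, g x) = some (x, g x) from by
        unfold ssrPickB; simp only [if_pos hsw]]
      obtain ⟨w, hw, hgood, hwo⟩ := ih x hx (fun v hv => hmem v (by simp [hv]))
      refine ⟨w, hw, ⟨?_, ?_⟩, hwo⟩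
      · rcases List.mem_cons.1 hgood.1 with rfl | hv'
        · simp
        · simp [hv']
      · intro v hv
        rcases List.mem_cons.1 hv with hveq | hv'
        · -- v = w0
          rw [hveq]
          rw [hrank x hx, hrank w0 hw0] at hsw
          rcases hgood.2 x (by simp) with h | h
          · rcases hsw with h2 | h2
            · left; omega
            · left; omega
          · rcases hsw with h2 | h2
            · left; omega
            · right; constructor
              · omega
              · omega
        · exact hgood.2 v hv'
    · rw [show ssrPickB rank (some (w0, g w0)) (x, g x) = some (w0, g w0) from by
        unfold ssrPickB; simp only [if_neg hsw]]
      obtain ⟨w, hw, hgood, hwo⟩ := ih w0 hw0 (fun v hv => hmem v (by simp [hv]))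
      refine ⟨w, hw, ⟨?_, ?_⟩, hwo⟩
      · rcases List.mem_cons.1 hgood.1 with rfl | hv'
        · simp
        · simp [hv']
      · intro v hv
        rw [hrank x hx, hrank w0 hw0] at hsw
        push Not at hsw
        rcases List.mem_cons.1 hv with rfl | hv'
        · exact hgood.2 v (by simp)
        rcases List.mem_cons.1 hv' with rfl | hv''
        · -- v = x : ¬(g w0 < g x) ∧ (g x = g w0 → idxOf w0 ≤ idxOf x)
          rcases hgood.2 w0 (by simp) with h | h
          · left; omega
          · by_cases hgx : g v < g w
            · left; exact hgx
            · right
              have h1 := hsw.1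
              have h2 := hsw.2
              constructor
              · omega
              · by_cases hxe : g v = g w0
                · have := h2 hxe
                  omega
                · omega
        · exact hgood.2 v (by simp [hv''])

theorem ssrUpdate_eq (cov : PySem.Set Int) (L : List Int) :
    L.foldl PySem.Set.add cov = PySem.Set.update cov L := rfl

theorem ssrUnc_cover (rr_sets : List (List Int)) (cov : PySem.Set Int) (w : Int)
    (hL : ∀ i : Nat, i < rr_sets.length →
      ((i : Int) ∈ (ssrInitA rr_sets).2.getD w [] ↔ w ∈ rr_sets.getD i [])) :
    ssrUnc rr_sets (((ssrInitA rr_sets).2.getD w []).foldl PySem.Set.add cov)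
      = (ssrUnc rr_sets cov).filter (fun rr => !rr.contains w) := by
  unfold ssrUnc
  rw [List.filter_map, List.filter_filter]
  congr 1
  apply List.filter_congr
  intro j hj
  have hjlen : j < rr_sets.length := List.mem_range.1 hj
  have hiff : ((j : Int) ∈ ((ssrInitA rr_sets).2.getD w []).foldl PySem.Set.add cov)
      ↔ ((j : Int) ∈ cov ∨ w ∈ rr_sets.getD j []) := by
    rw [ssrUpdate_eq, PySem.Set.mem_update]
    exact or_congr Iff.rfl (hL j hjlen)
  have hcont : ∀ (s : PySem.Set Int), s.contains ((j : Int)) = decide ((j : Int) ∈ s) := by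
    intro s
    by_cases h : (j : Int) ∈ s
    · simp [h]
    · simp [h]
  rw [hcont, hcont]
  have hrr : (rr_sets.getD j []).contains w = decide (w ∈ rr_sets.getD j []) := by
    by_cases h : w ∈ rr_sets.getD j []
    · simp
    · simp
  rw [Function.comp_def]
  simp only [hrr]
  by_cases h1 : (j : Int) ∈ cov <;> by_cases h2 : w ∈ rr_sets.getD j [] <;>
    simp [h1, hiff]

theorem ssrCanon_init (rr_sets : List (List Int)) :
    ssrCanon (ssrOrder rr_sets) (ssrCnt rr_sets PySem.Set.empty)
      = PySem.Dict.counter rr_sets.flatten := by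
  apply PySem.Dict.ext
  rw [ssrCanon_items, PySem.Dict.items_counter]
  have hfe : (ssrOrder rr_sets).filter (fun u => decide (0 < ssrCnt rr_sets PySem.Set.empty u))
      = ssrOrder rr_sets := by
    apply List.filter_eq_self.2
    intro u hu
    simp only [decide_eq_true_eq]
    rw [ssrCnt_pos_iff, ssrUnc_empty]
    exact (PySem.Set.mem_ofList _ _).1 hu
  rw [hfe]
  apply List.map_congr_left
  intro u hu
  unfold ssrCnt
  rw [ssrUnc_empty]

theorem ssrLoop_eq (rr_sets : List (List Int)) :
    ∀ (n : Nat) (cov : PySem.Set Int) (sel : List Int),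
    ssrLoopA rr_sets (ssrInitA rr_sets).2 n
        (ssrCanon (ssrOrder rr_sets) (ssrCnt rr_sets cov)) cov sel
      = ssrLoopB (ssrRankOf (ssrOrder rr_sets)) n (ssrUnc rr_sets cov) sel := by
  intro n
  induction n with
  | zero => intro cov sel; rfl
  | succ n ih =>
    intro cov sel
    have hnd : (ssrOrder rr_sets).Nodup := PySem.Set.nodup_ofList _
    have hcounts : ssrCounts (ssrUnc rr_sets cov) = PySem.Dict.counter (ssrUnc rr_sets cov).flatten := by
      unfold ssrCounts
      rw [List.foldl_flatten.symm, PySem.Dict.foldl_insert_getD_add_one_eq_counter]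
    have hitemsB : (ssrCounts (ssrUnc rr_sets cov)).items
        = (PySem.Set.ofList (ssrUnc rr_sets cov).flatten).map
            (fun v => (v, ssrCnt rr_sets cov v)) := by
      rw [hcounts, PySem.Dict.items_counter]
      rfl
    by_cases hemp : (ssrUnc rr_sets cov).flatten = []
    · -- both stop
      have hLA : (ssrOrder rr_sets).filter (fun u => decide (0 < ssrCnt rr_sets cov u)) = [] := by
        apply List.filter_eq_nil_iff.2
        intro u hu
        simp only [decide_eq_true_eq]
        rw [ssrCnt_pos_iff, hemp]
        simp
      have hccA : (ssrCanon (ssrOrder rr_sets) (ssrCnt rr_sets cov)).items = [] := by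
        rw [ssrCanon_items, hLA]; rfl
      have hccB : (ssrCounts (ssrUnc rr_sets cov)).items = [] := by
        rw [hitemsB, hemp]; rfl
      show (if (ssrCanon (ssrOrder rr_sets) (ssrCnt rr_sets cov)).items.isEmpty then sel
          else _) = _
      rw [hccA]
      simp only [List.isEmpty_nil, if_true]
      show sel = ssrLoopB _ (n+1) _ sel
      unfold ssrLoopB ssrBest
      rw [hccB]
      rfl
    · -- both pick the same node
      obtain ⟨u0, hu0⟩ := List.exists_mem_of_ne_nil _ hemp
      have hu0o : u0 ∈ ssrOrder rr_sets := ssrUnc_flatten_mem_order rr_sets cov u0 hu0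
      have hu0g : 0 < ssrCnt rr_sets cov u0 := (ssrCnt_pos_iff rr_sets cov u0).2 hu0
      -- A side list
      set LA := (ssrOrder rr_sets).filter (fun u => decide (0 < ssrCnt rr_sets cov u)) with hLAdef
      have hLAne : LA ≠ [] := by
        intro h
        have := List.filter_eq_nil_iff.1 h u0 hu0o
        simp [hu0g] at this
      have hLApw : LA.Pairwise (fun a b => (ssrOrder rr_sets).idxOf a < (ssrOrder rr_sets).idxOf b) :=
        (ssrPairwise_idxOf _ hnd).sublist List.filter_sublist
      have hLAmemiff : ∀ v, v ∈ LA ↔ v ∈ (ssrUnc rr_sets cov).flatten := by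
        intro v
        rw [hLAdef, List.mem_filter]
        constructor
        · rintro ⟨hvo, hvg⟩
          exact (ssrCnt_pos_iff rr_sets cov v).1 (by simpa using hvg)
        · intro hv
          exact ⟨ssrUnc_flatten_mem_order rr_sets cov v hv,
            by simp [(ssrCnt_pos_iff rr_sets cov v).2 hv]⟩
      obtain ⟨a0, LA', hLAc⟩ := List.exists_cons_of_ne_nil hLAne
      -- max? on A's items
      obtain ⟨wA, hwAeq, hwAgood⟩ := ssrMaxA_helper (ssrOrder rr_sets) (ssrCnt rr_sets cov) LA' a0 (hLAc ▸ hLApw)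
      have hmaxA : PySem.List.max? (ssrCanon (ssrOrder rr_sets) (ssrCnt rr_sets cov)).items (fun p => p.2)
          = some (wA, ssrCnt rr_sets cov wA) := by
        rw [ssrPickA_eq, ssrCanon_items, ← hLAdef, hLAc, List.map_cons, List.foldl_cons]
        rw [show ssrPickA none (a0, ssrCnt rr_sets cov a0) = some (a0, ssrCnt rr_sets cov a0) from rfl]
        exact hwAeq
      have hwAo : wA ∈ ssrOrder rr_sets := by
        have := hwAgood.1
        rw [← hLAc] at this
        exact List.mem_of_mem_filter this
      -- B side
      set S := PySem.Set.ofList (ssrUnc rr_sets cov).flatten with hSdef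
      have hSmem : ∀ v ∈ S, v ∈ ssrOrder rr_sets := by
        intro v hv
        exact ssrUnc_flatten_mem_order rr_sets cov v ((PySem.Set.mem_ofList _ _).1 hv)
      have hSne : S ≠ [] := by
        intro h
        have : u0 ∈ S := (PySem.Set.mem_ofList _ _).2 hu0
        rw [h] at this
        simp at this
      obtain ⟨s0, S', hSc⟩ := List.exists_cons_of_ne_nil hSne
      obtain ⟨wB, hwBeq, hwBgood, hwBo⟩ := ssrBestB_helper (ssrOrder rr_sets) (ssrCnt rr_sets cov)
        (ssrRankOf (ssrOrder rr_sets)) (fun v hv => ssrRankOf_getD _ hnd v hv) S' s0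
        (hSmem s0 (by rw [hSc]; simp)) (fun v hv => hSmem v (by rw [hSc]; simp [hv]))
      have hbestB : ssrBest (ssrRankOf (ssrOrder rr_sets)) (ssrCounts (ssrUnc rr_sets cov))
          = some (wB, ssrCnt rr_sets cov wB) := by
        rw [ssrPickB_eq, hitemsB, hSc, List.map_cons, List.foldl_cons]
        rw [show ssrPickB (ssrRankOf (ssrOrder rr_sets)) none (s0, ssrCnt rr_sets cov s0)
            = some (s0, ssrCnt rr_sets cov s0) from rfl]
        exact hwBeq
      -- same node
      have hww : wA = wB := by
        apply ssrGood_unique (ssrOrder rr_sets) (ssrCnt rr_sets cov) LA (s0 :: S') wA wB hnd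
          ?_ (hLAc ▸ hwAgood) hwBgood hwAo hwBo
        intro v
        rw [hLAmemiff v, ← hSc, hSdef, PySem.Set.mem_ofList]
      -- A one step
      have hccAne : (ssrCanon (ssrOrder rr_sets) (ssrCnt rr_sets cov)).items.isEmpty = false := by
        rw [ssrCanon_items, ← hLAdef, hLAc]
        rfl
      -- the covered-index update
      set Lw := (ssrInitA rr_sets).2.getD wA [] with hLwdef
      have hLwval : ∀ idx ∈ Lw, 0 ≤ idx ∧ idx.toNat < rr_sets.length := by
        intro idx hidx
        have := ssrIdxd_valid rr_sets wA idx hidx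
        exact ⟨this.1, this.2.1⟩
      have hcover := ssrCover_fold rr_sets hnd Lw cov
      set cov' := Lw.foldl PySem.Set.add cov with hcov'def
      have hLiff : ∀ i : Nat, i < rr_sets.length →
          ((i : Int) ∈ (ssrInitA rr_sets).2.getD wA [] ↔ wA ∈ rr_sets.getD i []) := by
        intro i hlen
        constructor
        · intro h
          have := ssrIdxd_valid rr_sets wA (i : Int) h
          have h2 := this.2.2
          rwa [show ((i : Int).toNat) = i by omega] at h2
        · intro h
          exact ssrIdxd_complete rr_sets wA i hlen h
      have hg'0 : ssrCnt rr_sets cov' wA = 0 := by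
        unfold ssrCnt
        rw [show ((0 : Int) = ((0 : Nat) : Int)) from rfl]
        congr 1
        rw [List.count_eq_zero]
        intro hmem
        obtain ⟨l, hl, hwl⟩ := List.mem_flatten.1 hmem
        unfold ssrUnc at hl
        obtain ⟨j, hj, rfl⟩ := List.mem_map.1 hl
        have hjf := List.mem_filter.1 hj
        have hjlen : j < rr_sets.length := List.mem_range.1 hjf.1
        have hjin : (j : Int) ∈ cov' := by
          rw [hcov'def, ssrUpdate_eq, PySem.Set.mem_update]
          exact Or.inr ((hLiff j hjlen).2 hwl)
        have := (ssrSetContainsF cov' _).1 (by simpa using hjf.2)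
        exact this hjin
      have hcontains : (ssrCanon (ssrOrder rr_sets) (ssrCnt rr_sets cov')).contains wA = false := by
        rw [ssrCanon_contains]
        simp [hg'0]
      -- B's filter is the new uncovered list
      have huncB : (ssrUnc rr_sets cov).filter (fun rr => !rr.contains wA) = ssrUnc rr_sets cov' :=
        (ssrUnc_cover rr_sets cov wA hLiff).symm
      -- assemble
      subst hww
      show (if (ssrCanon (ssrOrder rr_sets) (ssrCnt rr_sets cov)).items.isEmpty then sel
          else match PySem.List.max? (ssrCanon (ssrOrder rr_sets) (ssrCnt rr_sets cov)).items (fun p => p.2) with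
            | none => sel
            | some p =>
              ssrLoopA rr_sets (ssrInitA rr_sets).2 n
                (if ((((ssrInitA rr_sets).2.getD p.1 []).foldl (ssrCoverA rr_sets)
                        (cov, ssrCanon (ssrOrder rr_sets) (ssrCnt rr_sets cov))).2.contains p.1)
                  then (((ssrInitA rr_sets).2.getD p.1 []).foldl (ssrCoverA rr_sets)
                        (cov, ssrCanon (ssrOrder rr_sets) (ssrCnt rr_sets cov))).2.erase p.1
                  else (((ssrInitA rr_sets).2.getD p.1 []).foldl (ssrCoverA rr_sets)
                        (cov, ssrCanon (ssrOrder rr_sets) (ssrCnt rr_sets cov))).2)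
                (((ssrInitA rr_sets).2.getD p.1 []).foldl (ssrCoverA rr_sets)
                  (cov, ssrCanon (ssrOrder rr_sets) (ssrCnt rr_sets cov))).1
                (sel ++ [p.1]))
        = (match ssrBest (ssrRankOf (ssrOrder rr_sets)) (ssrCounts (ssrUnc rr_sets cov)) with
            | none => sel
            | some p => ssrLoopB (ssrRankOf (ssrOrder rr_sets)) n
                ((ssrUnc rr_sets cov).filter (fun rr => !rr.contains p.1)) (sel ++ [p.1]))
      rw [hccAne]
      simp only [Bool.false_eq_true, if_false]
      rw [hmaxA, hbestB]
      show ssrLoopA rr_sets (ssrInitA rr_sets).2 n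
          (if ((Lw.foldl (ssrCoverA rr_sets)
                  (cov, ssrCanon (ssrOrder rr_sets) (ssrCnt rr_sets cov))).2.contains wA)
            then (Lw.foldl (ssrCoverA rr_sets)
                  (cov, ssrCanon (ssrOrder rr_sets) (ssrCnt rr_sets cov))).2.erase wA
            else (Lw.foldl (ssrCoverA rr_sets)
                  (cov, ssrCanon (ssrOrder rr_sets) (ssrCnt rr_sets cov))).2)
          (Lw.foldl (ssrCoverA rr_sets)
            (cov, ssrCanon (ssrOrder rr_sets) (ssrCnt rr_sets cov))).1
          (sel ++ [wA])
        = ssrLoopB (ssrRankOf (ssrOrder rr_sets)) n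
            ((ssrUnc rr_sets cov).filter (fun rr => !rr.contains wA)) (sel ++ [wA])
      rw [hcover hLwval]
      show ssrLoopA rr_sets (ssrInitA rr_sets).2 n
          (if ((ssrCanon (ssrOrder rr_sets) (ssrCnt rr_sets cov')).contains wA)
            then (ssrCanon (ssrOrder rr_sets) (ssrCnt rr_sets cov')).erase wA
            else ssrCanon (ssrOrder rr_sets) (ssrCnt rr_sets cov'))
          cov' (sel ++ [wA])
        = ssrLoopB (ssrRankOf (ssrOrder rr_sets)) n
            ((ssrUnc rr_sets cov).filter (fun rr => !rr.contains wA)) (sel ++ [wA])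
      rw [hcontains]
      simp only [Bool.false_eq_true, if_false]
      rw [huncB]
      exact ih cov' (sel ++ [wA])

-- ===== VERDICT (by name: the statement is the Claim_ definition above) =====
theorem select_seed_via_rr_spec : Claim_equal_select_seed_via_rr := by
  unfold Claim_equal_select_seed_via_rr
  intro rr_sets k _
  unfold Spec_select_seed_via_rr
  show select_seed_via_rr rr_sets k = select_seed_via_rr_alt rr_sets k
  unfold select_seed_via_rr select_seed_via_rr_alt
  rw [ssrRank_eq]
  show ssrLoopA rr_sets (ssrInitA rr_sets).2 k.toNat (ssrInitA rr_sets).1 PySem.Set.empty []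
      = ssrLoopB (ssrRankOf (ssrOrder rr_sets)) k.toNat rr_sets []
  rw [show (ssrInitA rr_sets).1 = ssrCanon (ssrOrder rr_sets) (ssrCnt rr_sets PySem.Set.empty) from by
    rw [ssrInitA_cc, ssrCanon_init]]
  have h := ssrLoop_eq rr_sets k.toNat PySem.Set.empty []
  rw [ssrUnc_empty] at h
  exact h
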